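-- pv_equiv track=rewrite | github.com/jackljk/jackljk.github.io | coding/UCSD/DSC/DSC20/homeworks/hw02.py | channel_stats
-- ===== SOURCE A (Python) =====
-- def channel_stats(videos_stats):
--     """
--     ############################################################## # First I
--     iterate through the list of lists. Then add the according statistic to a
--     variable each. Then return everything as a list of tuples.# # method
--     description and add at least 3 more doctests below. #
--     ##############################################################
--
--     >>> channel_stats ([[123, 231, 82, 430], [340, 158, 225, 647]])
--     [('likes', 463), ('dislikes', 389), ('comments', 307), ('views', 1077)]
--     >>> channel_stats([[865, 342, 205, 230]])
--     [('likes', 865), ('dislikes', 342), ('comments', 205), ('views', 230)]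
--     >>> channel_stats([[954, 234, 235, 2035], [1040, 350, 394, 2500], \
-- [70, 43, 23, 230]])
--     [('likes', 2064), ('dislikes', 627), ('comments', 652), ('views', 4765)]
--
--     # Add at least 3 doctests below here #
--     """
--     likes, likes_pos = 0, 0
--     dislikes, dislikes_pos = 0, 1
--     comments, comments_pos = 0, 2
--     views, views_pos = 0, 3
--     for stats in videos_stats:
--         likes += stats[likes_pos]
--         dislikes += stats[dislikes_pos]
--         comments += stats[comments_pos]
--         views += stats[views_pos]
--     lst = [('likes', likes), ('dislikes', dislikes), ('comments', comments),
--            ('views', views)]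
--     return lst
-- ===== SOURCE B (Python) =====
-- def channel_stats(videos_stats):
--     labels = ['likes', 'dislikes', 'comments', 'views']
--     totals = [sum(row[i] for row in videos_stats) for i in range(4)]
--     return list(zip(labels, totals))
-- ===== Notes on version B (the rewrite author's own statement) =====
-- stated objective: alternative
-- what changed: Replaces A's single pass carrying four named accumulators with four independent column scans (one sum per statistic) zipped against the label list.
import Mathlib
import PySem

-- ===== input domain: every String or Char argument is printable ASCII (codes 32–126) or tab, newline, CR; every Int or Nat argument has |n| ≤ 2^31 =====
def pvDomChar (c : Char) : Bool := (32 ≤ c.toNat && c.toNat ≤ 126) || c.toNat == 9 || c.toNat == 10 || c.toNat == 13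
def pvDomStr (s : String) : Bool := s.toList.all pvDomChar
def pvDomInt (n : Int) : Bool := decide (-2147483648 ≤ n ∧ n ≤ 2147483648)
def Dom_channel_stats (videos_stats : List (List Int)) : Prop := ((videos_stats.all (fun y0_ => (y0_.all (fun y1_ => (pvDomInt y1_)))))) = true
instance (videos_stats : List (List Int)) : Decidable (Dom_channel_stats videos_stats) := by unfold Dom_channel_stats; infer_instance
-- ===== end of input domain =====

-- B computes each statistic with its own column scan zipped against the labels, instead of A's single pass with four accumulators; Pre_ excludes rows shorter than 4, on which A raises IndexError.


-- ===== PORT A =====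
-- one pass, four accumulators (stats[i] → pyGet?; none only outside Pre_, where Python raises — getD 0 is never the value claimed)
def channel_stats (videos_stats : List (List Int)) : List (String × Int) :=
  let s := videos_stats.foldl
    (fun (acc : Int × Int × Int × Int) stats =>
      (acc.1 + (PySem.List.pyGet? stats 0).getD 0,
       acc.2.1 + (PySem.List.pyGet? stats 1).getD 0,
       acc.2.2.1 + (PySem.List.pyGet? stats 2).getD 0,
       acc.2.2.2 + (PySem.List.pyGet? stats 3).getD 0))
    (0, 0, 0, 0)
  [("likes", s.1), ("dislikes", s.2.1), ("comments", s.2.2.1), ("views", s.2.2.2)]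

-- ===== PORT B =====
-- four independent column sums, zipped with the labels (row[i] → pyGet?, same raise behaviour outside Pre_)
def channel_stats_alt (videos_stats : List (List Int)) : List (String × Int) :=
  let totals := (PySem.List.pyRange 0 4 1).map
    (fun i => (videos_stats.map (fun row => (PySem.List.pyGet? row i).getD 0)).sum)
  List.zip ["likes", "dislikes", "comments", "views"] totals

-- ===== PRECONDITION & SPEC =====
-- Pre_ excludes inputs with a row of fewer than 4 entries, on which the Python A raises IndexError.
def Pre_channel_stats (videos_stats : List (List Int)) : Prop :=
  ∀ row ∈ videos_stats, 4 ≤ row.length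
instance (videos_stats : List (List Int)) : Decidable (Pre_channel_stats videos_stats) := by unfold Pre_channel_stats; infer_instance
def pvWitness_channel_stats : List (List Int) := [[123, 231, 82, 430], [340, 158, 225, 647]]
def Spec_channel_stats (videos_stats : List (List Int)) (out : List (String × Int)) : Prop := out = channel_stats_alt videos_stats
instance (videos_stats : List (List Int)) (out : List (String × Int)) : Decidable (Spec_channel_stats videos_stats out) := by unfold Spec_channel_stats; infer_instance

-- ===== CLAIM (what is proved, stated in full; the proofs are below) =====
def Claim_equal_channel_stats : Prop := ∀ (videos_stats : List (List Int)), Dom_channel_stats videos_stats → Pre_channel_stats videos_stats → Spec_channel_stats videos_stats (channel_stats videos_stats)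

-- ===== LEMMAS AND PROOFS =====

-- the column sum of B, as a plain function of the list
def pvCol (videos_stats : List (List Int)) (i : Int) : Int :=
  (videos_stats.map (fun row => (PySem.List.pyGet? row i).getD 0)).sum

-- A's quadruple fold, with the accumulator generalized, equals the four column sums
lemma channel_stats_fold (videos_stats : List (List Int)) (a b c d : Int) :
    videos_stats.foldl
      (fun (acc : Int × Int × Int × Int) stats =>
        (acc.1 + (PySem.List.pyGet? stats 0).getD 0,
         acc.2.1 + (PySem.List.pyGet? stats 1).getD 0,
         acc.2.2.1 + (PySem.List.pyGet? stats 2).getD 0,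
         acc.2.2.2 + (PySem.List.pyGet? stats 3).getD 0))
      (a, b, c, d)
    = (a + pvCol videos_stats 0, b + pvCol videos_stats 1,
       c + pvCol videos_stats 2, d + pvCol videos_stats 3) := by
  induction videos_stats generalizing a b c d with
  | nil => simp [pvCol]
  | cons row rest ih =>
      simp only [List.foldl_cons, ih, pvCol, List.map_cons, List.sum_cons]
      ring_nf

theorem channel_stats_spec : Claim_equal_channel_stats := by
  intro vs _ _
  unfold Spec_channel_stats channel_stats channel_stats_alt
  rw [channel_stats_fold, (by decide : PySem.List.pyRange 0 4 1 = [0, 1, 2, 3])]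
  simp [pvCol]
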